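-- pv_equiv track=rewrite | github.com/Elektrofussel/FFMPEG-Konverter | main.py | _best_encoder_for_container
-- ===== SOURCE A (Python) =====
-- from typing import Dict, List, Optional, Tuple
--
-- VIDEO_ENCODERS = [
--     "libx264",
--     "libx265",
--     "h264_nvenc",
--     "hevc_nvenc",
--     "h264_amf",
--     "hevc_amf",
--     "h264_qsv",
--     "hevc_qsv",
--     "libvpx",
--     "libvpx-vp9",
--     "mpeg2video",
--     "wmv2",
-- ]
--
-- VIDEO_ENCODERS_BY_FORMAT = {
--     "mp4": ["libx264", "libx265", "h264_nvenc", "hevc_nvenc", "h264_amf", "hevc_amf", "h264_qsv", "hevc_qsv"],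
--     "mov": ["libx264", "libx265", "h264_nvenc", "hevc_nvenc", "h264_amf", "hevc_amf", "h264_qsv", "hevc_qsv"],
--     "avi": ["libx264", "mpeg2video", "wmv2"],
--     "asf": ["wmv2", "libx264"],
--     "flv": ["libx264", "libx265"],
--     "mkv": ["libx264", "libx265", "h264_nvenc", "hevc_nvenc", "h264_amf", "hevc_amf", "h264_qsv", "hevc_qsv", "libvpx", "libvpx-vp9"],
--     "webm": ["libvpx", "libvpx-vp9"],
--     "mpg": ["mpeg2video"],
-- }
--
-- def _best_encoder_for_container(fmt: str, available_enc: set, profile: str = "Allgemein") -> Optional[str]: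
--     choices = VIDEO_ENCODERS_BY_FORMAT.get(fmt, VIDEO_ENCODERS)
--     if profile == "Smartphone":
--         priority = [
--             "h264_amf",
--             "h264_nvenc",
--             "h264_qsv",
--             "libx264",
--             "hevc_amf",
--             "hevc_nvenc",
--             "hevc_qsv",
--             "libx265",
--             "libvpx-vp9",
--             "libvpx",
--             "mpeg2video",
--             "wmv2",
--         ]
--     elif profile == "Archiv":
--         priority = [
--             "libx265",
--             "hevc_amf",
--             "hevc_nvenc",
--             "hevc_qsv",
--             "libvpx-vp9",
--             "libx264",
--             "h264_amf",
--             "h264_nvenc",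
--             "h264_qsv",
--             "libvpx",
--             "mpeg2video",
--             "wmv2",
--         ]
--     elif profile == "YouTube":
--         priority = [
--             "libx264",
--             "h264_amf",
--             "h264_nvenc",
--             "h264_qsv",
--             "libx265",
--             "hevc_amf",
--             "hevc_nvenc",
--             "hevc_qsv",
--             "libvpx-vp9",
--             "libvpx",
--             "mpeg2video",
--             "wmv2",
--         ]
--     else:
--         priority = [
--             "hevc_amf",
--             "hevc_nvenc",
--             "hevc_qsv",
--             "h264_amf",
--             "h264_nvenc",
--             "h264_qsv",
--             "libx265",
--             "libx264",
--             "libvpx-vp9",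
--             "libvpx",
--             "mpeg2video",
--             "wmv2",
--         ]
--     for enc in priority:
--         if enc in choices and enc in available_enc:
--             return enc
--     return None
-- ===== SOURCE B (Python) =====
-- from typing import Optional
--
-- VIDEO_ENCODERS = [
--     "libx264", "libx265", "h264_nvenc", "hevc_nvenc", "h264_amf", "hevc_amf",
--     "h264_qsv", "hevc_qsv", "libvpx", "libvpx-vp9", "mpeg2video", "wmv2",
-- ]
--
-- VIDEO_ENCODERS_BY_FORMAT = {
--     "mp4": ["libx264", "libx265", "h264_nvenc", "hevc_nvenc", "h264_amf", "hevc_amf", "h264_qsv", "hevc_qsv"],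
--     "mov": ["libx264", "libx265", "h264_nvenc", "hevc_nvenc", "h264_amf", "hevc_amf", "h264_qsv", "hevc_qsv"],
--     "avi": ["libx264", "mpeg2video", "wmv2"],
--     "asf": ["wmv2", "libx264"],
--     "flv": ["libx264", "libx265"],
--     "mkv": ["libx264", "libx265", "h264_nvenc", "hevc_nvenc", "h264_amf", "hevc_amf", "h264_qsv", "hevc_qsv", "libvpx", "libvpx-vp9"],
--     "webm": ["libvpx", "libvpx-vp9"],
--     "mpg": ["mpeg2video"],
-- }
--
-- PRIORITY_BY_PROFILE = {
--     "Smartphone": ["h264_amf", "h264_nvenc", "h264_qsv", "libx264", "hevc_amf", "hevc_nvenc", "hevc_qsv", "libx265", "libvpx-vp9", "libvpx", "mpeg2video", "wmv2"],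
--     "Archiv": ["libx265", "hevc_amf", "hevc_nvenc", "hevc_qsv", "libvpx-vp9", "libx264", "h264_amf", "h264_nvenc", "h264_qsv", "libvpx", "mpeg2video", "wmv2"],
--     "YouTube": ["libx264", "h264_amf", "h264_nvenc", "h264_qsv", "libx265", "hevc_amf", "hevc_nvenc", "hevc_qsv", "libvpx-vp9", "libvpx", "mpeg2video", "wmv2"],
-- }
--
-- DEFAULT_PRIORITY = ["hevc_amf", "hevc_nvenc", "hevc_qsv", "h264_amf", "h264_nvenc", "h264_qsv", "libx265", "libx264", "libvpx-vp9", "libvpx", "mpeg2video", "wmv2"]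
--
--
-- def _best_encoder_for_container(fmt: str, available_enc: set, profile: str = "Allgemein") -> Optional[str]:
--     choices = VIDEO_ENCODERS_BY_FORMAT.get(fmt, VIDEO_ENCODERS)
--     priority = PRIORITY_BY_PROFILE.get(profile, DEFAULT_PRIORITY)
--     # candidate set, then argmin by priority rank (every candidate occurs in priority)
--     valid = [e for e in available_enc if e in choices]
--     return min(valid, key=priority.index, default=None)
-- ===== Notes on version B (the rewrite author's own statement) =====
-- stated objective: alternative
-- what changed: Replaces A's ordered early-return scan over the profile priority list (and the if/elif profile chain) by building the candidate list available_enc ∩ choices and selecting the winner as argmin by priority rank via min(valid, key=priority.index, default=None), with the profile→priority selection done by a dict lookup.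
import Mathlib
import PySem

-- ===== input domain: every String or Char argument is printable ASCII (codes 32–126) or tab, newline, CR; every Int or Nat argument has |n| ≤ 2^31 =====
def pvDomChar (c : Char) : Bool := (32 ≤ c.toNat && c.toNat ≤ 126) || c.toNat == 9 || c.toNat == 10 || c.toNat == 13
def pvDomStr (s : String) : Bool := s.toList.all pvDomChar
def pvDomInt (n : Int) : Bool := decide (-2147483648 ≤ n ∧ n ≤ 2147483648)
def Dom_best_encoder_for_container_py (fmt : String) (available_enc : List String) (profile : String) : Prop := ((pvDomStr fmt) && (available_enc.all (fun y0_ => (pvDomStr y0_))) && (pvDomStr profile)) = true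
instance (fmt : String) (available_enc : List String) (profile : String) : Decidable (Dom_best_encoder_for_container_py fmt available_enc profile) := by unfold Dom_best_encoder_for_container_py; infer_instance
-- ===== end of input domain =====

-- B replaces A's ordered early-return scan over the priority list by building the candidate
-- set (available ∩ choices) and taking the argmin by priority rank (objective: alternative).

-- ===== PORT A =====
-- module constants (shared verbatim by both Python files)
def videoEncoders : List String :=
  ["libx264", "libx265", "h264_nvenc", "hevc_nvenc", "h264_amf", "hevc_amf",
   "h264_qsv", "hevc_qsv", "libvpx", "libvpx-vp9", "mpeg2video", "wmv2"]

def videoEncodersByFormat : PySem.Dict String (List String) :=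
  PySem.Dict.ofList
    [("mp4", ["libx264", "libx265", "h264_nvenc", "hevc_nvenc", "h264_amf", "hevc_amf", "h264_qsv", "hevc_qsv"]),
     ("mov", ["libx264", "libx265", "h264_nvenc", "hevc_nvenc", "h264_amf", "hevc_amf", "h264_qsv", "hevc_qsv"]),
     ("avi", ["libx264", "mpeg2video", "wmv2"]),
     ("asf", ["wmv2", "libx264"]),
     ("flv", ["libx264", "libx265"]),
     ("mkv", ["libx264", "libx265", "h264_nvenc", "hevc_nvenc", "h264_amf", "hevc_amf", "h264_qsv", "hevc_qsv", "libvpx", "libvpx-vp9"]),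
     ("webm", ["libvpx", "libvpx-vp9"]),
     ("mpg", ["mpeg2video"])]

-- 'for enc in priority: if enc in choices and enc in available_enc: return enc / return None'
def scanPriority (choices available_enc : List String) : List String → Option String
  | [] => none
  | enc :: rest =>
      if choices.contains enc && available_enc.contains enc then some enc
      else scanPriority choices available_enc rest

def best_encoder_for_container_py (fmt : String) (available_enc : List String) (profile : String) : Option String :=
  let choices := videoEncodersByFormat.getD fmt videoEncoders
  let priority :=
    if profile = "Smartphone" then
      ["h264_amf", "h264_nvenc", "h264_qsv", "libx264", "hevc_amf", "hevc_nvenc",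
       "hevc_qsv", "libx265", "libvpx-vp9", "libvpx", "mpeg2video", "wmv2"]
    else if profile = "Archiv" then
      ["libx265", "hevc_amf", "hevc_nvenc", "hevc_qsv", "libvpx-vp9", "libx264",
       "h264_amf", "h264_nvenc", "h264_qsv", "libvpx", "mpeg2video", "wmv2"]
    else if profile = "YouTube" then
      ["libx264", "h264_amf", "h264_nvenc", "h264_qsv", "libx265", "hevc_amf",
       "hevc_nvenc", "hevc_qsv", "libvpx-vp9", "libvpx", "mpeg2video", "wmv2"]
    else
      ["hevc_amf", "hevc_nvenc", "hevc_qsv", "h264_amf", "h264_nvenc", "h264_qsv",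
       "libx265", "libx264", "libvpx-vp9", "libvpx", "mpeg2video", "wmv2"]
  scanPriority choices available_enc priority

-- ===== PORT B =====
def priorityByProfile : PySem.Dict String (List String) :=
  PySem.Dict.ofList
    [("Smartphone", ["h264_amf", "h264_nvenc", "h264_qsv", "libx264", "hevc_amf", "hevc_nvenc", "hevc_qsv", "libx265", "libvpx-vp9", "libvpx", "mpeg2video", "wmv2"]),
     ("Archiv", ["libx265", "hevc_amf", "hevc_nvenc", "hevc_qsv", "libvpx-vp9", "libx264", "h264_amf", "h264_nvenc", "h264_qsv", "libvpx", "mpeg2video", "wmv2"]),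
     ("YouTube", ["libx264", "h264_amf", "h264_nvenc", "h264_qsv", "libx265", "hevc_amf", "hevc_nvenc", "hevc_qsv", "libvpx-vp9", "libvpx", "mpeg2video", "wmv2"])]

def defaultPriority : List String :=
  ["hevc_amf", "hevc_nvenc", "hevc_qsv", "h264_amf", "h264_nvenc", "h264_qsv",
   "libx265", "libx264", "libvpx-vp9", "libvpx", "mpeg2video", "wmv2"]

def best_encoder_for_container_py_alt (fmt : String) (available_enc : List String) (profile : String) : Option String :=
  let choices := videoEncodersByFormat.getD fmt videoEncoders
  let priority := priorityByProfile.getD profile defaultPriority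
  let valid := available_enc.filter (fun e => choices.contains e)
  -- key=priority.index; every element of valid is in priority, so index? is always some
  -- (the getD default 0 is never used); exact port of min(valid, key=priority.index, default=None)
  PySem.List.min? valid (fun e => (PySem.List.index? priority e).getD 0)

-- ===== PRECONDITION & SPEC =====
def Spec_best_encoder_for_container_py (fmt : String) (available_enc : List String) (profile : String) (out : Option String) : Prop := out = best_encoder_for_container_py_alt fmt available_enc profile
instance (fmt : String) (available_enc : List String) (profile : String) (out : Option String) : Decidable (Spec_best_encoder_for_container_py fmt available_enc profile out) := by unfold Spec_best_encoder_for_container_py; infer_instance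

-- ===== CLAIM (what is proved, stated in full; the proofs are below) =====
def Claim_equal_best_encoder_for_container_py : Prop := ∀ (fmt : String) (available_enc : List String) (profile : String), Dom_best_encoder_for_container_py fmt available_enc profile → Spec_best_encoder_for_container_py fmt available_enc profile (best_encoder_for_container_py fmt available_enc profile)

-- ===== LEMMAS AND PROOFS =====

-- A's scan is List.find?
theorem scanPriority_eq_find? (choices available_enc : List String) (l : List String) :
    scanPriority choices available_enc l
      = l.find? (fun e => choices.contains e && available_enc.contains e) := by
  induction l with
  | nil => rfl
  | cons x xs ih =>
      simp only [scanPriority, List.find?_cons]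
      by_cases h1 : x ∈ choices <;> by_cases h2 : x ∈ available_enc <;>
        simp [h1, h2, ih]

-- core equivalence: the ordered scan of priority equals the argmin-by-rank over the candidates,
-- provided every element of choices occurs in priority
theorem find_eq_min (priority choices available_enc : List String)
    (hsub : ∀ e ∈ choices, e ∈ priority) :
    priority.find? (fun e => choices.contains e && available_enc.contains e)
      = PySem.List.min? (available_enc.filter (fun e => choices.contains e))
          (fun e => (PySem.List.index? priority e).getD 0) := by
  set valid := available_enc.filter (fun e => choices.contains e) with hvalid
  have hmem : ∀ e, e ∈ valid ↔ (e ∈ available_enc ∧ e ∈ choices) := by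
    intro e
    simp [hvalid, List.mem_filter, and_comm]
  by_cases hv : valid = []
  · rw [hv]
    rw [show PySem.List.min? ([] : List String) (fun e => (PySem.List.index? priority e).getD 0) = none from rfl]
    apply List.find?_eq_none.mpr
    intro x hx
    simp only [Bool.and_eq_true, List.contains_eq_mem, decide_eq_true_eq, not_and]
    intro hc ha
    have : x ∈ valid := (hmem x).mpr ⟨ha, hc⟩
    simp [hv] at this
  · obtain ⟨m, hm⟩ : ∃ m, PySem.List.min? valid (fun e => (PySem.List.index? priority e).getD 0) = some m := by
      rcases h : PySem.List.min? valid (fun e => (PySem.List.index? priority e).getD 0) with _ | m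
      · exact absurd ((PySem.List.min?_eq_none_iff _ _).mp h) hv
      · exact ⟨m, rfl⟩
    rw [hm]
    have hmv : m ∈ valid := PySem.List.min?_mem hm
    have hmin := PySem.List.min?_isMin hm
    obtain ⟨hma, hmc⟩ := (hmem m).mp hmv
    -- m lies in priority at index k, with no earlier occurrence of m
    obtain ⟨k, hk⟩ : ∃ k, PySem.List.index? priority m = some k := by
      rcases h : PySem.List.index? priority m with _ | k
      · exact absurd (hsub m hmc) ((PySem.List.index?_eq_none_iff _ _).mp h)
      · exact ⟨k, rfl⟩
    obtain ⟨pre, suf, hsplit, hlen, hnotpre⟩ := (PySem.List.index?_eq_some_iff _ _ _).mp hk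
    rw [hsplit]
    rw [List.find?_append]
    have hpre : pre.find? (fun e => choices.contains e && available_enc.contains e) = none := by
      apply List.find?_eq_none.mpr
      intro x hx
      simp only [Bool.and_eq_true, List.contains_eq_mem, decide_eq_true_eq, not_and]
      intro hc ha
      have hxv : x ∈ valid := (hmem x).mpr ⟨ha, hc⟩
      have hle := hmin x hxv
      -- index of x is within pre, hence < k = index of m
      have hxp : PySem.List.index? priority x = PySem.List.index? pre x := by
        rw [hsplit]; exact PySem.List.index?_append_of_mem _ hx
      obtain ⟨j, hj⟩ : ∃ j, PySem.List.index? pre x = some j := by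
        rcases h : PySem.List.index? pre x with _ | j
        · exact absurd hx ((PySem.List.index?_eq_none_iff _ _).mp h)
        · exact ⟨j, rfl⟩
      obtain ⟨hjlt, -⟩ := PySem.List.getElem_of_index?_eq_some hj
      rw [hk] at hle
      rw [hxp, hj] at hle
      simp only [Option.getD_some] at hle
      omega
    rw [hpre]
    simp [hmc, hma]

-- every choices list is contained in every priority list (all hold all 12 encoders)
theorem videoEncodersByFormat_eq_mk :
    videoEncodersByFormat = PySem.Dict.mk
    [("mp4", ["libx264", "libx265", "h264_nvenc", "hevc_nvenc", "h264_amf", "hevc_amf", "h264_qsv", "hevc_qsv"]),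
     ("mov", ["libx264", "libx265", "h264_nvenc", "hevc_nvenc", "h264_amf", "hevc_amf", "h264_qsv", "hevc_qsv"]),
     ("avi", ["libx264", "mpeg2video", "wmv2"]),
     ("asf", ["wmv2", "libx264"]),
     ("flv", ["libx264", "libx265"]),
     ("mkv", ["libx264", "libx265", "h264_nvenc", "hevc_nvenc", "h264_amf", "hevc_amf", "h264_qsv", "hevc_qsv", "libvpx", "libvpx-vp9"]),
     ("webm", ["libvpx", "libvpx-vp9"]),
     ("mpg", ["mpeg2video"])] := by decide

theorem choices_sub_encoders (fmt : String) :
    ∀ e ∈ videoEncodersByFormat.getD fmt videoEncoders, e ∈ videoEncoders := by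
  rw [videoEncodersByFormat_eq_mk]
  simp only [PySem.Dict.getD]
  rw [PySem.Dict.get?_mk_cons, PySem.Dict.get?_mk_cons, PySem.Dict.get?_mk_cons,
      PySem.Dict.get?_mk_cons, PySem.Dict.get?_mk_cons, PySem.Dict.get?_mk_cons,
      PySem.Dict.get?_mk_cons, PySem.Dict.get?_mk_cons]
  split_ifs <;> (intro e he; simp only [Option.getD_some, PySem.Dict.get?] at he; fin_cases he <;> decide)

theorem choices_sub_priority (fmt profile : String) :
    ∀ e ∈ videoEncodersByFormat.getD fmt videoEncoders,
      e ∈ (if profile = "Smartphone" then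
      ["h264_amf", "h264_nvenc", "h264_qsv", "libx264", "hevc_amf", "hevc_nvenc",
       "hevc_qsv", "libx265", "libvpx-vp9", "libvpx", "mpeg2video", "wmv2"]
    else if profile = "Archiv" then
      ["libx265", "hevc_amf", "hevc_nvenc", "hevc_qsv", "libvpx-vp9", "libx264",
       "h264_amf", "h264_nvenc", "h264_qsv", "libvpx", "mpeg2video", "wmv2"]
    else if profile = "YouTube" then
      ["libx264", "h264_amf", "h264_nvenc", "h264_qsv", "libx265", "hevc_amf",
       "hevc_nvenc", "hevc_qsv", "libvpx-vp9", "libvpx", "mpeg2video", "wmv2"]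
    else
      ["hevc_amf", "hevc_nvenc", "hevc_qsv", "h264_amf", "h264_nvenc", "h264_qsv",
       "libx265", "libx264", "libvpx-vp9", "libvpx", "mpeg2video", "wmv2"]) := by
  intro e he
  have hv : e ∈ videoEncoders := choices_sub_encoders fmt e he
  split_ifs <;> (fin_cases hv <;> decide)

-- the profile→priority selection: A's if-chain equals B's dict lookup
theorem priority_lookup (profile : String) :
    priorityByProfile.getD profile defaultPriority
      = (if profile = "Smartphone" then
      ["h264_amf", "h264_nvenc", "h264_qsv", "libx264", "hevc_amf", "hevc_nvenc",
       "hevc_qsv", "libx265", "libvpx-vp9", "libvpx", "mpeg2video", "wmv2"]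
    else if profile = "Archiv" then
      ["libx265", "hevc_amf", "hevc_nvenc", "hevc_qsv", "libvpx-vp9", "libx264",
       "h264_amf", "h264_nvenc", "h264_qsv", "libvpx", "mpeg2video", "wmv2"]
    else if profile = "YouTube" then
      ["libx264", "h264_amf", "h264_nvenc", "h264_qsv", "libx265", "hevc_amf",
       "hevc_nvenc", "hevc_qsv", "libvpx-vp9", "libvpx", "mpeg2video", "wmv2"]
    else
      ["hevc_amf", "hevc_nvenc", "hevc_qsv", "h264_amf", "h264_nvenc", "h264_qsv",
       "libx265", "libx264", "libvpx-vp9", "libvpx", "mpeg2video", "wmv2"]) := by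
  have hmk : priorityByProfile = PySem.Dict.mk
    [("Smartphone", ["h264_amf", "h264_nvenc", "h264_qsv", "libx264", "hevc_amf", "hevc_nvenc", "hevc_qsv", "libx265", "libvpx-vp9", "libvpx", "mpeg2video", "wmv2"]),
     ("Archiv", ["libx265", "hevc_amf", "hevc_nvenc", "hevc_qsv", "libvpx-vp9", "libx264", "h264_amf", "h264_nvenc", "h264_qsv", "libvpx", "mpeg2video", "wmv2"]),
     ("YouTube", ["libx264", "h264_amf", "h264_nvenc", "h264_qsv", "libx265", "hevc_amf", "hevc_nvenc", "hevc_qsv", "libvpx-vp9", "libvpx", "mpeg2video", "wmv2"])] := by decide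
  rw [hmk]
  simp only [PySem.Dict.getD]
  rw [PySem.Dict.get?_mk_cons, PySem.Dict.get?_mk_cons, PySem.Dict.get?_mk_cons]
  simp only [beq_iff_eq, eq_comm (b := profile)]
  split_ifs <;> simp [PySem.Dict.get?, defaultPriority]

-- ===== VERDICT (by name: the statement is the Claim_ definition above) =====
theorem best_encoder_for_container_py_spec : Claim_equal_best_encoder_for_container_py := by
  intro fmt available_enc profile _
  unfold Spec_best_encoder_for_container_py best_encoder_for_container_py best_encoder_for_container_py_alt
  simp only []
  rw [priority_lookup, scanPriority_eq_find?]
  exact find_eq_min _ _ _ (choices_sub_priority fmt profile)
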